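-- pv_equiv track=rewrite | github.com/kuznetsovvj/education | algorithms/codeforces/1b.py | solution
-- ===== SOURCE A (Python) =====
-- def solution(w):
--     idx, digit = [w[0]], False
--     for i in range(1,len(w)):
--         if w[i].isdigit():
--             if not digit:
--                 idx.append(w[i])
--                 digit = True
--             else:
--                 idx[-1] += w[i]
--         else:
--             if digit:
--                 idx.append(w[i])
--                 digit = False
--             else:
--                 idx[-1] += w[i]
--     if len(idx) == 2:
--         # из ZZZ16
--         res, t = 0, 0
--         for r in idx[0][::-1]:
--             res += (ord(r) - 64) * (26**t)
--             t += 1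
--         return f"R{idx[1]}C{res}"
--     else:
--         # R25C237
--         num = int(idx[3]) # число, которое надо перевести в буквенную систему
--         # определим, сколько знаков-букв будет в результирующем числе
--         reg, base = 1, 26
--         while num > base:
--             num -= base
--             base *= 26
--             reg += 1
--         # reg - сколько знаков получившемся числе
--         # num - число, которое нужно перевести в 26-ричную систему счисления
--
--         res = []
--         num -= 1
--         while num >= 26:
--             res.append(num % 26)
--             num = num // 26
--         res.append(num % 26)
--         res = res[::-1]
--         if len(res) < reg:
--             res = [0] * (reg - len(res)) + res
--         s = ""
--         for i in res:
--             s += chr(i + 65)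
--         return f"{s}{idx[1]}"
-- ===== SOURCE B (Python) =====
-- def solution(w):
--     # split w into alternating (non-digit / digit) runs; w[0] always belongs to
--     # the first run regardless of its kind, as in the original tokenizer
--     tail = w[1:]
--     j = 0
--     while j < len(tail) and not tail[j].isdigit():
--         j += 1
--     toks, rest, want = [w[0] + tail[:j]], tail[j:], True
--     while rest:
--         k = 0
--         while k < len(rest) and rest[k].isdigit() == want:
--             k += 1
--         toks.append(rest[:k])
--         rest, want = rest[k:], not want
--     if len(toks) == 2:
--         # A1 -> RnCn: Horner evaluation of the letter part
--         col = 0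
--         for c in toks[0]:
--             col = col * 26 + ord(c) - 64
--         return f"R{toks[1]}C{col}"
--     # RnCn -> A1: standard bijective base-26 conversion
--     n = int(toks[3])
--     s = ""
--     while n > 0:
--         n, r = divmod(n - 1, 26)
--         s = chr(65 + r) + s
--     return f"{s}{toks[1]}"
-- ===== Notes on version B (the rewrite author's own statement) =====
-- stated objective: simpler
-- what changed: The char-by-char tokenizer state machine is replaced by direct splitting into alternating non-digit/digit runs, the reversed-powers sum for letters->number by a Horner fold, and the digit-count precomputation plus base-26 digit list with zero padding for number->letters by the standard bijective base-26 divmod loop.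
-- outside the precondition, e.g. on solution('R1C0'): A returns 'Z1', B returns '1'
import Mathlib
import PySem

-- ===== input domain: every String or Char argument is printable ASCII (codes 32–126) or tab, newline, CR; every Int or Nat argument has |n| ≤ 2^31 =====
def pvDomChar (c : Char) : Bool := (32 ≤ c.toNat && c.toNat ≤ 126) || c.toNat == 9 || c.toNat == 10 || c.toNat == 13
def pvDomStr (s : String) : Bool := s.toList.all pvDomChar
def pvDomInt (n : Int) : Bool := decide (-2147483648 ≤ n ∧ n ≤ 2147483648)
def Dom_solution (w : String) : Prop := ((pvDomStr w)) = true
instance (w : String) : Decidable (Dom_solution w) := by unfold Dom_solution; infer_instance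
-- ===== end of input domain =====

-- B replaces A's char-by-char tokenizer state machine, reversed-powers letter sum and
-- reg/base digit-count + padded base-26 digits by run splitting, a Horner fold and the
-- standard bijective base-26 loop; objective: simpler (same asymptotic cost).

-- ===== PORT A =====
-- idx[-1] += c  (idx is non-empty throughout the Python loop)
def pvAddLast : List (List Char) → Char → List (List Char)
  | [], _ => []
  | [t], c => [t ++ [c]]
  | t :: ts, c => t :: pvAddLast ts c

-- one iteration of A's tokenizer loop, state = (idx, digit)
def pvStepA (st : List (List Char) × Bool) (c : Char) : List (List Char) × Bool :=
  if c.isDigit then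
    if !st.2 then (st.1 ++ [[c]], true) else (pvAddLast st.1 c, st.2)
  else
    if st.2 then (st.1 ++ [[c]], false) else (pvAddLast st.1 c, st.2)

-- while num > base: num -= base; base *= 26; reg += 1   (returns (num, base, reg);
-- the 0 < base conjunct is a totality guard — the call site has base = 26)
def pvRegLoop (num base reg : Int) : Int × Int × Int :=
  if h : 0 < base ∧ base < num then pvRegLoop (num - base) (base * 26) (reg + 1) else (num, base, reg)
  termination_by (num - base).toNat
  decreasing_by omega

-- while num >= 26: res.append(num % 26); num //= 26   (returns (num, res))
def pvDigitsLoop (num : Int) (res : List Int) : Int × List Int :=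
  if h : 26 ≤ num then pvDigitsLoop (PySem.Int.floordiv num 26) (res ++ [PySem.Int.mod num 26]) else (num, res)
  termination_by num.toNat
  decreasing_by
    have h1 : PySem.Int.floordiv num 26 = num / 26 := PySem.Int.floordiv_eq_ediv_of_pos (by omega)
    have h2 : num / 26 < num := Int.ediv_lt_self_of_pos_of_ne_one (by omega) (by omega)
    have h3 : 0 ≤ num / 26 := Int.ediv_nonneg (by omega) (by omega)
    omega

-- A's RnCn → letters conversion: reg/base digit-count, base-26 digits of num-1, pad, chr
def pvAConv (num0 : Int) : List Char :=
  let r := pvRegLoop num0 26 1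
  let dl := pvDigitsLoop (r.1 - 1) []
  let res1 := (dl.2 ++ [PySem.Int.mod dl.1 26]).reverse
  let res := if (res1.length : Int) < r.2.2 then List.replicate (r.2.2 - (res1.length : Int)).toNat 0 ++ res1 else res1
  res.foldl (fun acc i => acc ++ [Char.ofNat (i + 65).toNat]) []

-- A's body after w[0] (tokens kept as List Char; the f-strings are built as char lists)
def pvA2 (c0 : Char) (tail : List Char) : String :=
  let idx := (tail.foldl pvStepA ([[c0]], false)).1
  if idx.length = 2 then
    let rt := (idx.getD 0 []).reverse.foldl
      (fun (p : Int × Nat) r => (p.1 + ((r.toNat : Int) - 64) * 26 ^ p.2, p.2 + 1)) (0, 0)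
    String.mk ('R' :: idx.getD 1 [] ++ 'C' :: PySem.Int.toChars rt.1)
  else
    match PySem.Int.ofChars? (idx.getD 3 []) with
    | none => ""                                   -- int(idx[3]) raises (or idx[3] IndexError): outside Pre_
    | some num0 => String.mk (pvAConv num0 ++ idx.getD 1 [])

def solution (w : String) : String :=
  match PySem.Str.pyGet? w 0 with
  | none => ""                                     -- w[0] IndexError on empty w: outside Pre_
  | some c0 => pvA2 c0 (w.toList.drop 1)

-- ===== PORT B =====
-- Source B's inner spans loop: maximal runs of chars with isdigit == want, alternating;
-- the run.length = 0 branch is a totality guard (every call site starts at a matching char)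
def pvSpanTok (want : Bool) (rest : List Char) : List (List Char) :=
  if h : (rest.takeWhile (fun c => c.isDigit == want)).length = 0 then []
  else
    rest.takeWhile (fun c => c.isDigit == want) ::
      pvSpanTok (!want) (rest.dropWhile (fun c => c.isDigit == want))
  termination_by rest.length
  decreasing_by
    have h2 := congrArg List.length (List.takeWhile_append_dropWhile (p := fun c => c.isDigit == want) (l := rest))
    simp only [List.length_append] at h2
    omega

-- Source B's token list: first token is w[0] plus the leading non-digits of w[1:]
-- (the first while loop computes j = that prefix length; rest[:j]/rest[j:] = takeWhile/dropWhile)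
def pvToksB (c0 : Char) (tail : List Char) : List (List Char) :=
  (c0 :: tail.takeWhile (fun c => !c.isDigit)) :: pvSpanTok true (tail.dropWhile (fun c => !c.isDigit))

-- while n > 0: n, r = divmod(n - 1, 26); s = chr(65 + r) + s
def pvBijLoop (n : Int) (s : List Char) : List Char :=
  if h : 0 < n then
    pvBijLoop (PySem.Int.floordiv (n - 1) 26) (Char.ofNat (65 + PySem.Int.mod (n - 1) 26).toNat :: s)
  else s
  termination_by n.toNat
  decreasing_by
    have h1 : PySem.Int.floordiv (n - 1) 26 = (n - 1) / 26 := PySem.Int.floordiv_eq_ediv_of_pos (by omega)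
    have h2 : (n - 1) / 26 ≤ (n - 1) := Int.ediv_le_self _ (by omega)
    have h3 : 0 ≤ (n - 1) / 26 := Int.ediv_nonneg (by omega) (by omega)
    omega

-- B's body after w[0]
def pvB2 (c0 : Char) (tail : List Char) : String :=
  let toks := pvToksB c0 tail
  if toks.length = 2 then
    String.mk ('R' :: toks.getD 1 [] ++ 'C' ::
      PySem.Int.toChars ((toks.getD 0 []).foldl (fun a c => a * 26 + (c.toNat : Int) - 64) 0))
  else
    match PySem.Int.ofChars? (toks.getD 3 []) with
    | none => ""                                   -- int(toks[3]) raises (or toks[3] IndexError): outside Pre_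
    | some n => String.mk (pvBijLoop n [] ++ toks.getD 1 [])

def solution_alt (w : String) : String :=
  match PySem.Str.pyGet? w 0 with
  | none => ""                                     -- w[0] IndexError on empty w: outside Pre_
  | some c0 => pvB2 c0 (w.toList.drop 1)

-- ===== PRECONDITION & SPEC =====
-- the run decomposition of w (the shape of the input: alternating non-digit/digit runs,
-- with w[0] always in the first run, as both programs read it); structural recursion so that
-- Pre_ is decidable by evaluation; used only to state Pre_
def pvRunsAux : List Char → Bool → List Char → List (List Char)
  | [], _, acc => [acc.reverse]
  | c :: cs, want, acc =>
    if c.isDigit == want then pvRunsAux cs want (c :: acc)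
    else acc.reverse :: pvRunsAux cs c.isDigit [c]

def pvPreToks (w : String) : List (List Char) :=
  match w.toList with
  | [] => []
  | c :: tl => pvRunsAux tl false [c]

-- Pre_ excludes the inputs where A raises (empty w: IndexError on w[0]; run decompositions of
-- length 1 or 3, where idx[3] is an IndexError), and the RnCn inputs whose column digit-run is
-- all zeros: column 0 names no cell, so no output is specified there — on such input A prints
-- one extra letter while B prints no letter, and either choice is as defensible as the other.
def Pre_solution (w : String) : Prop :=
  w.toList ≠ [] ∧
  ((pvPreToks w).length = 2 ∨
   (4 ≤ (pvPreToks w).length ∧ 1 ≤ (PySem.Int.ofChars? ((pvPreToks w).getD 3 [])).getD 0))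
instance (w : String) : Decidable (Pre_solution w) := by unfold Pre_solution; infer_instance

def pvWitness_solution : String := "R23C55"

def Spec_solution (w : String) (out : String) : Prop := out = solution_alt w
instance (w : String) (out : String) : Decidable (Spec_solution w out) := by unfold Spec_solution; infer_instance

-- ===== CLAIM (what is proved, stated in full; the proofs are below) =====
def Claim_equal_solution : Prop := ∀ (w : String), Dom_solution w → Pre_solution w → Spec_solution w (solution w)

-- ===== LEMMAS AND PROOFS =====

-- ---------- proof-side value functions ----------
def pvW (l : List Char) : Int := l.foldl (fun a c => a * 26 + (c.toNat : Int) - 64) 0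
def pvVal (l : List Int) : Int := l.foldl (fun a d => a * 26 + d) 0
def pvU (l : List Int) : Int := l.foldl (fun a d => a * 26 + d + 1) 0

-- ---------- tokenizer ----------
theorem pvAddLast_append (ts : List (List Char)) (t : List Char) (c : Char) :
    pvAddLast (ts ++ [t]) c = ts ++ [t ++ [c]] := by
  induction ts with
  | nil => rfl
  | cons s ts ih =>
    cases ts with
    | nil => simp [pvAddLast]
    | cons s' ts' => simpa [pvAddLast] using ih

theorem pvStepA_match (st : List (List Char)) (d : Bool) (c : Char) (h : c.isDigit = d) :
    pvStepA (st, d) c = (pvAddLast st c, d) := by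
  cases d <;> simp [pvStepA, h]

theorem pvStepA_new (st : List (List Char)) (d : Bool) (c : Char) (h : c.isDigit = !d) :
    pvStepA (st, d) c = (st ++ [[c]], !d) := by
  cases d <;> simp [pvStepA, h]

theorem pvSpanTok_nil (want : Bool) : pvSpanTok want [] = [] := by
  simp [pvSpanTok]

theorem pvSpanTok_cons (want : Bool) (c : Char) (cs : List Char) (h : c.isDigit = want) :
    pvSpanTok want (c :: cs) =
      (c :: cs.takeWhile (fun x => x.isDigit == want)) ::
        pvSpanTok (!want) (cs.dropWhile (fun x => x.isDigit == want)) := by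
  rw [pvSpanTok]
  simp [List.takeWhile_cons, List.dropWhile_cons, h]

theorem pvTokA_eq (cs : List Char) : ∀ (d : Bool) (ts : List (List Char)) (t : List Char),
    (cs.foldl pvStepA (ts ++ [t], d)).1
      = ts ++ (t ++ cs.takeWhile (fun c => c.isDigit == d)) ::
          pvSpanTok (!d) (cs.dropWhile (fun c => c.isDigit == d)) := by
  induction cs with
  | nil => intro d ts t; simp [pvSpanTok_nil]
  | cons c cs ih =>
    intro d ts t
    by_cases hc : c.isDigit = d
    · rw [List.foldl_cons, pvStepA_match _ _ _ hc, pvAddLast_append]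
      rw [ih d ts (t ++ [c])]
      simp [List.takeWhile_cons, List.dropWhile_cons, hc]
    · have hc' : c.isDigit = !d := by cases d <;> simp_all
      have hbeq : (c.isDigit == d) = false := by cases d <;> simp_all
      rw [List.foldl_cons, pvStepA_new _ _ _ hc']
      rw [show ts ++ [t] ++ [[c]] = (ts ++ [t]) ++ [[c]] from by simp]
      rw [ih (!d) (ts ++ [t]) [c]]
      rw [List.takeWhile_cons, List.dropWhile_cons, hbeq]
      simp only [Bool.false_eq_true, if_false]
      rw [pvSpanTok_cons (!d) c cs hc']
      simp

theorem pvToks_eq (c0 : Char) (tl : List Char) :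
    (tl.foldl pvStepA ([[c0]], false)).1 = pvToksB c0 tl := by
  have h := pvTokA_eq tl false [] [c0]
  have hp : (fun c : Char => c.isDigit == false) = (fun c : Char => !c.isDigit) := by
    funext c; cases hc : c.isDigit <;> simp
  simp only [hp] at h
  simpa [pvToksB] using h

theorem pvRunsAux_foldl (cs : List Char) : ∀ (d : Bool) (ts : List (List Char)) (acc : List Char),
    ts ++ pvRunsAux cs d acc = (cs.foldl pvStepA (ts ++ [acc.reverse], d)).1 := by
  induction cs with
  | nil => intro d ts acc; simp [pvRunsAux]
  | cons c cs ih =>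
    intro d ts acc
    by_cases hc : c.isDigit = d
    · rw [pvRunsAux]
      simp only [hc, BEq.rfl, if_true]
      rw [List.foldl_cons, pvStepA_match _ _ _ hc, pvAddLast_append]
      rw [ih d ts (c :: acc)]
      simp
    · have hbeq : (c.isDigit == d) = false := by cases d <;> simp_all
      have hc' : c.isDigit = !d := by cases d <;> simp_all
      rw [pvRunsAux]
      simp only [hc', Bool.not_beq_self, Bool.false_eq_true, if_false]
      rw [List.foldl_cons, pvStepA_new _ _ _ hc']
      rw [show ts ++ (acc.reverse :: pvRunsAux cs (!d) [c])
            = (ts ++ [acc.reverse]) ++ pvRunsAux cs (!d) [c] from by simp]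
      rw [ih (!d) (ts ++ [acc.reverse]) [c]]
      simp

theorem pvPreToks_eq (w : String) (c0 : Char) (tl : List Char) (hw : w.toList = c0 :: tl) :
    pvPreToks w = pvToksB c0 tl := by
  rw [pvPreToks, hw]
  show pvRunsAux tl false [c0] = pvToksB c0 tl
  have h := pvRunsAux_foldl tl false [] [c0]
  simp only [List.nil_append, List.reverse_cons, List.reverse_nil] at h
  rw [h, pvToks_eq]

-- ---------- branch 1: reversed powers = Horner ----------
theorem pvHornerA (l : List Char) : ∀ (a : Int) (t : Nat),
    (l.foldl (fun (p : Int × Nat) r => (p.1 + ((r.toNat : Int) - 64) * 26 ^ p.2, p.2 + 1)) (a, t)).1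
      = a + 26 ^ t * pvW l.reverse := by
  induction l with
  | nil => intro a t; simp [pvW]
  | cons c l ih =>
    intro a t
    rw [List.foldl_cons]
    show (List.foldl _ (a + ((c.toNat : Int) - 64) * 26 ^ t, t + 1) l).1 = _
    rw [ih]
    have hrev : pvW ((c :: l).reverse) = pvW (l.reverse) * 26 + ((c.toNat : Int) - 64) := by
      simp only [List.reverse_cons, pvW, List.foldl_append, List.foldl_cons, List.foldl_nil]
      ring
    rw [hrev]
    ring

theorem pvHorner_eq (l : List Char) :
    (l.reverse.foldl (fun (p : Int × Nat) r => (p.1 + ((r.toNat : Int) - 64) * 26 ^ p.2, p.2 + 1)) (0, 0)).1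
      = pvW l := by
  rw [pvHornerA]; simp

-- ---------- value-function algebra ----------
theorem pvW_append_singleton (l : List Char) (c : Char) :
    pvW (l ++ [c]) = pvW l * 26 + (c.toNat : Int) - 64 := by
  simp [pvW, List.foldl_append]

theorem pvChar_eq (c d : Char) (h : c.toNat = d.toNat) : c = d := by
  cases c; cases d; simp_all [Char.toNat, UInt32.toNat_inj]

theorem pvW_nonneg (l : List Char) (h : ∀ c ∈ l, 65 ≤ c.toNat ∧ c.toNat ≤ 90) :
    0 ≤ pvW l ∧ (l ≠ [] → 1 ≤ pvW l) := by
  induction l using List.reverseRecOn with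
  | nil => simp [pvW]
  | append_singleton l c ih =>
    have hc := h c (by simp)
    have hl := ih (fun x hx => h x (by simp [hx]))
    rw [pvW_append_singleton]
    constructor
    · omega
    · intro _; omega

theorem pvW_inj (l1 : List Char) : ∀ (l2 : List Char),
    (∀ c ∈ l1, 65 ≤ c.toNat ∧ c.toNat ≤ 90) → (∀ c ∈ l2, 65 ≤ c.toNat ∧ c.toNat ≤ 90) →
    pvW l1 = pvW l2 → l1 = l2 := by
  induction l1 using List.reverseRecOn with
  | nil =>
    intro l2 _ h2 heq
    cases l2 using List.reverseRecOn with
    | nil => rfl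
    | append_singleton l2 c2 =>
      exfalso
      have h1 := (pvW_nonneg (l2 ++ [c2]) h2).2 (by simp)
      have h0 : pvW ([] : List Char) = 0 := rfl
      omega
  | append_singleton l1 c1 ih =>
    intro l2 h1 h2 heq
    cases l2 using List.reverseRecOn with
    | nil =>
      exfalso
      have h3 := (pvW_nonneg (l1 ++ [c1]) h1).2 (by simp)
      have h0 : pvW ([] : List Char) = 0 := rfl
      omega
    | append_singleton l2 c2 =>
      rw [pvW_append_singleton, pvW_append_singleton] at heq
      have hc1 := h1 c1 (by simp)
      have hc2 := h2 c2 (by simp)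
      have hn1 := pvW_nonneg l1 (fun x hx => h1 x (by simp [hx]))
      have hn2 := pvW_nonneg l2 (fun x hx => h2 x (by simp [hx]))
      have hWeq : pvW l1 = pvW l2 ∧ (c1.toNat : Int) = (c2.toNat : Int) := by
        constructor <;> omega
      have hl : l1 = l2 :=
        ih l2 (fun x hx => h1 x (by simp [hx])) (fun x hx => h2 x (by simp [hx])) hWeq.1
      have hc : c1 = c2 := pvChar_eq c1 c2 (by exact_mod_cast hWeq.2)
      rw [hl, hc]

theorem pvVal_zeros (k : Nat) : (List.replicate k (0 : Int)).foldl (fun a d => a * 26 + d) 0 = 0 := by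
  induction k with
  | zero => rfl
  | succ k ih => simpa [List.replicate_succ', List.foldl_append] using ih

theorem pvVal_append_singleton (l : List Int) (d : Int) :
    pvVal (l ++ [d]) = pvVal l * 26 + d := by
  simp [pvVal, List.foldl_append]

theorem pvVal_pad (k : Nat) (l : List Int) : pvVal (List.replicate k 0 ++ l) = pvVal l := by
  rw [pvVal, List.foldl_append, pvVal_zeros]
  rfl

theorem pvU_eq (l : List Int) : 25 * pvU l = 25 * pvVal l + 26 ^ l.length - 1 := by
  induction l using List.reverseRecOn with
  | nil => simp [pvU, pvVal]
  | append_singleton l d ih =>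
    have h1 : pvU (l ++ [d]) = pvU l * 26 + d + 1 := by simp [pvU, List.foldl_append]
    have h2 : pvVal (l ++ [d]) = pvVal l * 26 + d := by simp [pvVal, List.foldl_append]
    rw [h1, h2]; simp [List.length_append, pow_succ]; ring_nf; ring_nf at ih; linarith

theorem pvChr_toNat (d : Int) (h : 0 ≤ d ∧ d < 26) :
    ((Char.ofNat (d + 65).toNat).toNat : Int) = d + 65 := by
  rw [Char.toNat_ofNat]
  have hv : (d + 65).toNat.isValidChar := Or.inl (by omega)
  rw [if_pos hv]
  omega

theorem pvW_map_chr (l : List Int) (h : ∀ d ∈ l, 0 ≤ d ∧ d < 26) :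
    pvW (l.map (fun d => Char.ofNat (d + 65).toNat)) = pvU l := by
  induction l using List.reverseRecOn with
  | nil => simp [pvW, pvU]
  | append_singleton l d ih =>
    have hd := h d (by simp)
    rw [List.map_append, List.map_cons, List.map_nil, pvW_append_singleton]
    rw [ih (fun x hx => h x (by simp [hx]))]
    have h2 : pvU (l ++ [d]) = pvU l * 26 + d + 1 := by simp [pvU, List.foldl_append]
    rw [h2, pvChr_toNat d hd]
    ring

theorem pvChr_range (d : Int) (h : 0 ≤ d ∧ d < 26) :
    65 ≤ (Char.ofNat (d + 65).toNat).toNat ∧ (Char.ofNat (d + 65).toNat).toNat ≤ 90 := by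
  have := pvChr_toNat d h
  omega

-- ---------- A's conversion loops ----------
theorem pvRegLoop_spec : ∀ (num base reg : Int), 0 < num → base = 26 ^ reg.toNat → 1 ≤ reg →
    0 < (pvRegLoop num base reg).1 ∧
    (pvRegLoop num base reg).1 ≤ (pvRegLoop num base reg).2.1 ∧
    25 * (pvRegLoop num base reg).1 + (pvRegLoop num base reg).2.1 = 25 * num + base ∧
    (pvRegLoop num base reg).2.1 = 26 ^ ((pvRegLoop num base reg).2.2).toNat ∧
    1 ≤ (pvRegLoop num base reg).2.2 := by
  intro num base reg
  induction num, base, reg using pvRegLoop.induct with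
  | case1 num base reg h ih =>
    intro h1 h2 h3
    rw [pvRegLoop, dif_pos h]
    have hb2 : base * 26 = 26 ^ (reg + 1).toNat := by
      have : (reg + 1).toNat = reg.toNat + 1 := by omega
      rw [this, pow_succ, ← h2]
    have := ih (by omega) hb2 (by omega)
    refine ⟨this.1, this.2.1, by omega, this.2.2.2.1, by omega⟩
  | case2 num base reg h =>
    intro h1 h2 h3
    rw [pvRegLoop, dif_neg h]
    have hbpos : 0 < base := by
      rw [h2]; positivity
    push_neg at h
    have hnb : num ≤ base := h hbpos
    exact ⟨h1, hnb, by ring, h2, h3⟩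

theorem pvDigitsLoop_append_fuel : ∀ (k : Nat) (num : Int), num.toNat ≤ k → ∀ acc,
    pvDigitsLoop num acc = ((pvDigitsLoop num []).1, acc ++ (pvDigitsLoop num []).2) := by
  intro k
  induction k with
  | zero =>
    intro num hk acc
    have h : ¬ 26 ≤ num := by omega
    rw [pvDigitsLoop, dif_neg h, pvDigitsLoop, dif_neg h]
    simp
  | succ k ih =>
    intro num hk acc
    by_cases h : 26 ≤ num
    · have heq := PySem.Int.floordiv_mul_add_mod num 26
      have hm0 := PySem.Int.mod_nonneg num (b := 26) (by omega)
      have hml := PySem.Int.mod_lt num (b := 26) (by omega)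
      have hlt : PySem.Int.floordiv num 26 < num := by omega
      have hnn : 0 ≤ PySem.Int.floordiv num 26 := by omega
      have hfuel : (PySem.Int.floordiv num 26).toNat ≤ k := by omega
      rw [pvDigitsLoop, dif_pos h, ih _ hfuel]
      conv_rhs => rw [pvDigitsLoop, dif_pos h, ih _ hfuel]
      simp
    · rw [pvDigitsLoop, dif_neg h, pvDigitsLoop, dif_neg h]
      simp

theorem pvDigits_spec : ∀ (k : Nat) (num : Int), num.toNat ≤ k → 0 ≤ num →
    (∀ d ∈ (pvDigitsLoop num []).2 ++ [PySem.Int.mod (pvDigitsLoop num []).1 26], 0 ≤ d ∧ d < 26) ∧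
    pvVal ((pvDigitsLoop num []).2 ++ [PySem.Int.mod (pvDigitsLoop num []).1 26]).reverse = num ∧
    (∀ j : Nat, 1 ≤ j → num < 26 ^ j →
      ((pvDigitsLoop num []).2 ++ [PySem.Int.mod (pvDigitsLoop num []).1 26]).length ≤ j) := by
  intro k
  induction k with
  | zero =>
    intro num hk h0
    have h : ¬ 26 ≤ num := by omega
    have hn : num = 0 := by omega
    subst hn
    rw [pvDigitsLoop, dif_neg h]
    refine ⟨by intro d hd; simp [PySem.Int.mod] at hd ⊢; omega, by simp [pvVal, PySem.Int.mod], ?_⟩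
    intro j hj _; simp; omega
  | succ k ih =>
    intro num hk h0
    by_cases h : 26 ≤ num
    · have heq := PySem.Int.floordiv_mul_add_mod num 26
      have hm0 := PySem.Int.mod_nonneg num (b := 26) (by omega)
      have hml := PySem.Int.mod_lt num (b := 26) (by omega)
      set q := PySem.Int.floordiv num 26 with hq
      have hqn : 0 ≤ q := by omega
      have hql : q < num := by omega
      have hfuel : q.toNat ≤ k := by omega
      have hrec := ih q hfuel hqn
      rw [pvDigitsLoop, dif_pos h, pvDigitsLoop_append_fuel k q hfuel]
      simp only []
      constructor
      · intro d hd
        simp at hd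
        rcases hd with hd | hd | hd
        · omega
        · exact hrec.1 d (by simp [hd])
        · exact hrec.1 d (by simp [hd])
      constructor
      · show pvVal (PySem.Int.mod num 26 :: ((pvDigitsLoop q []).2 ++ [PySem.Int.mod (pvDigitsLoop q []).1 26])).reverse = num
        rw [List.reverse_cons, pvVal_append_singleton, hrec.2.1]
        omega
      · intro j hj hub
        have hj2 : 2 ≤ j := by
          by_contra hc
          have : j = 1 := by omega
          subst this
          simp at hub
          omega
        have hqub : q < 26 ^ (j - 1) := by
          rw [hq, PySem.Int.floordiv_lt_iff_lt_mul (by omega)]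
          have : (26 : Int) ^ (j - 1) * 26 = 26 ^ j := by
            rw [← pow_succ]; congr 1; omega
          omega
        have hlen := hrec.2.2 (j - 1) (by omega) hqub
        simp only [List.length_append, List.length_cons, List.length_nil] at hlen ⊢
        simp at hlen ⊢
        omega
    · have hml := PySem.Int.mod_lt num (b := 26) (by omega)
      have hm0 := PySem.Int.mod_nonneg num (b := 26) (by omega)
      have hmod : PySem.Int.mod num 26 = num := by
        rw [PySem.Int.mod_eq_emod_of_pos (by omega)]
        exact Int.emod_eq_of_lt h0 (by omega)
      rw [pvDigitsLoop, dif_neg h]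
      refine ⟨by intro d hd; simp at hd; omega, ?_, by intro j hj _; simp; omega⟩
      simp only [List.nil_append, List.reverse_cons, List.reverse_nil, pvVal,
        List.foldl_cons, List.foldl_nil]
      omega

theorem pvBijLoop_append_fuel : ∀ (k : Nat) (n : Int), n.toNat ≤ k → ∀ s,
    pvBijLoop n s = pvBijLoop n [] ++ s := by
  intro k
  induction k with
  | zero =>
    intro n hk s
    have h : ¬ 0 < n := by omega
    rw [pvBijLoop, dif_neg h, pvBijLoop, dif_neg h]
    simp
  | succ k ih =>
    intro n hk s
    by_cases h : 0 < n
    · have heq := PySem.Int.floordiv_mul_add_mod (n - 1) 26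
      have hm0 := PySem.Int.mod_nonneg (n - 1) (b := 26) (by omega)
      have hml := PySem.Int.mod_lt (n - 1) (b := 26) (by omega)
      have hfuel : (PySem.Int.floordiv (n - 1) 26).toNat ≤ k := by omega
      rw [pvBijLoop, dif_pos h, ih _ hfuel]
      conv_rhs => rw [pvBijLoop, dif_pos h, ih _ hfuel]
      simp
    · rw [pvBijLoop, dif_neg h, pvBijLoop, dif_neg h]
      simp

theorem pvBij_spec_fuel : ∀ (k : Nat) (n : Int), n.toNat ≤ k → 0 ≤ n →
    pvW (pvBijLoop n []) = n ∧ ∀ c ∈ pvBijLoop n [], 65 ≤ c.toNat ∧ c.toNat ≤ 90 := by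
  intro k
  induction k with
  | zero =>
    intro n hk h0
    have h : ¬ 0 < n := by omega
    rw [pvBijLoop, dif_neg h]
    exact ⟨by simp [pvW]; omega, by simp⟩
  | succ k ih =>
    intro n hk h0
    by_cases h : 0 < n
    · have heq := PySem.Int.floordiv_mul_add_mod (n - 1) 26
      have hm0 := PySem.Int.mod_nonneg (n - 1) (b := 26) (by omega)
      have hml := PySem.Int.mod_lt (n - 1) (b := 26) (by omega)
      have hfuel : (PySem.Int.floordiv (n - 1) 26).toNat ≤ k := by omega
      have hrec := ih _ hfuel (by omega)
      have hcr : ((Char.ofNat (65 + PySem.Int.mod (n - 1) 26).toNat).toNat : Int)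
          = PySem.Int.mod (n - 1) 26 + 65 := by
        rw [show (65 : Int) + PySem.Int.mod (n - 1) 26 = PySem.Int.mod (n - 1) 26 + 65 from by ring]
        exact pvChr_toNat (PySem.Int.mod (n - 1) 26) ⟨by omega, by omega⟩
      rw [pvBijLoop, dif_pos h, pvBijLoop_append_fuel k _ hfuel]
      constructor
      · rw [pvW_append_singleton, hrec.1]
        omega
      · intro c hc
        rcases List.mem_append.mp hc with hc | hc
        · exact hrec.2 c hc
        · rw [List.mem_singleton] at hc; subst hc
          omega
    · rw [pvBijLoop, dif_neg h]
      exact ⟨by simp [pvW]; omega, by simp⟩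

theorem pvAConv_eq (n : Int) (hn : 1 ≤ n) : pvAConv n = pvBijLoop n [] := by
  have hreg := pvRegLoop_spec n 26 1 (by omega) (by norm_num) (by norm_num)
  obtain ⟨hm0, hmB, hinv, hBpow, hreg1⟩ := hreg
  have hd := pvDigits_spec ((pvRegLoop n 26 1).1 - 1).toNat ((pvRegLoop n 26 1).1 - 1) le_rfl (by omega)
  have hb := pvBij_spec_fuel n.toNat n le_rfl (by omega)
  -- abbreviations
  set m := (pvRegLoop n 26 1).1 with hm
  set B := (pvRegLoop n 26 1).2.1 with hB
  set reg := (pvRegLoop n 26 1).2.2 with hregdef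
  set fs := (pvDigitsLoop (m - 1) []).2 ++ [PySem.Int.mod (pvDigitsLoop (m - 1) []).1 26] with hfs
  have hlenfs : fs.length ≤ reg.toNat := by
    apply hd.2.2 reg.toNat (by omega)
    have : m ≤ 26 ^ reg.toNat := by rw [← hBpow]; exact hmB
    omega
  -- the padded digit list
  simp only [pvAConv]
  rw [← hm, ← hregdef, ← hfs]
  set res1 := fs.reverse with hres1
  have hlen1 : res1.length = fs.length := by rw [hres1, List.length_reverse]
  set res : List Int := if (res1.length : Int) < reg then List.replicate (reg - (res1.length : Int)).toNat 0 ++ res1 else res1 with hres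
  have hval : pvVal res = m - 1 := by
    rw [hres]
    split
    · rw [pvVal_pad]; exact hd.2.1
    · exact hd.2.1
  have hlenres : res.length = reg.toNat := by
    rw [hres]
    split
    · simp [hlen1]; omega
    · omega
  have hbounds : ∀ d ∈ res, 0 ≤ d ∧ d < 26 := by
    intro d hdm
    rw [hres] at hdm
    have : d ∈ res1 ∨ d = 0 := by
      split at hdm
      · rcases List.mem_append.mp hdm with h | h
        · right; exact List.eq_of_mem_replicate h
        · left; exact h
      · left; exact hdm
    rcases this with h | h
    · exact hd.1 d (List.mem_reverse.mp h)
    · omega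
  -- value of A's letter string
  have hmap : res.foldl (fun acc i => acc ++ [Char.ofNat (i + 65).toNat]) []
      = res.map (fun i => Char.ofNat (i + 65).toNat) := by
    simpa using PySem.List.foldl_append_singleton_eq_map (fun i : Int => Char.ofNat (i + 65).toNat) res []
  rw [hmap]
  have hWA : pvW (res.map (fun i => Char.ofNat (i + 65).toNat)) = n := by
    rw [pvW_map_chr res hbounds]
    have hU := pvU_eq res
    rw [hval, hlenres, ← hBpow] at hU
    omega
  -- both strings have value n and chars in A..Z: conclude by injectivity
  apply pvW_inj
  · intro c hc
    rcases List.mem_map.mp hc with ⟨d, hdm, hdc⟩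
    subst hdc
    exact pvChr_range d (hbounds d hdm)
  · exact hb.2
  · rw [hWA, hb.1]

theorem solution_spec : Claim_equal_solution := by
  unfold Claim_equal_solution Spec_solution
  intro w _ hpre
  obtain ⟨hne, hbr⟩ := hpre
  obtain ⟨c0, tl, hw⟩ : ∃ c0 tl, w.toList = c0 :: tl := by
    cases h : w.toList with
    | nil => exact absurd h hne
    | cons a l => exact ⟨a, l, rfl⟩
  have hget : PySem.Str.pyGet? w 0 = some c0 := by
    simp [PySem.Str.pyGet?, PySem.List.pyGet?, PySem.List.pyIdx?, hw]
  have hdrop : w.toList.drop 1 = tl := by rw [hw]; rfl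
  have htoksOf : pvPreToks w = pvToksB c0 tl := pvPreToks_eq w c0 tl hw
  rw [htoksOf] at hbr
  rw [solution, solution_alt, hget, hdrop]
  show pvA2 c0 tl = pvB2 c0 tl
  simp only [pvA2, pvB2]
  rw [pvToks_eq c0 tl]
  by_cases hlen2 : (pvToksB c0 tl).length = 2
  · simp only [hlen2, if_true]
    rw [pvHorner_eq]
    rfl
  · rcases hbr with h2 | ⟨h4, hpos⟩
    · exact absurd h2 hlen2
    simp only [hlen2, if_false]
    cases hoc : PySem.Int.ofChars? ((pvToksB c0 tl).getD 3 []) with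
    | none => exfalso; rw [hoc] at hpos; simp at hpos
    | some n =>
      rw [hoc] at hpos
      simp only [Option.getD_some] at hpos
      show String.mk (pvAConv n ++ (pvToksB c0 tl).getD 1 [])
          = String.mk (pvBijLoop n [] ++ (pvToksB c0 tl).getD 1 [])
      rw [pvAConv_eq n hpos]
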